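-- pv_equiv track=rewrite | github.com/KotisKotlyandii/lessons1 | ege22/51.py | f
-- ===== SOURCE A (Python) =====
-- def f(x):
--     a,b = 0,0
--     while x > 0:
--         c = x % 2
--         if c == 0:
--             a += 1
--         else:
--             b += 1
--         x //= 8
--     return '%d\n%d' % (a,b)
-- ===== SOURCE B (Python) =====
-- def f(x):
--     if x <= 0:
--         return '0\n0'
--     s = oct(x)[2:]
--     b = sum(1 for d in s if int(d) & 1)
--     a = len(s) - b
--     return '%d\n%d' % (a, b)
-- ===== Notes on version B (the rewrite author's own statement) =====
-- stated objective: idiomatic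
-- what changed: B replaces A's fused while-loop accumulating two counters with the octal string oct(x)[2:]: it counts the odd digits with one comprehension and derives the even count by subtracting from the length.
import Mathlib
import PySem

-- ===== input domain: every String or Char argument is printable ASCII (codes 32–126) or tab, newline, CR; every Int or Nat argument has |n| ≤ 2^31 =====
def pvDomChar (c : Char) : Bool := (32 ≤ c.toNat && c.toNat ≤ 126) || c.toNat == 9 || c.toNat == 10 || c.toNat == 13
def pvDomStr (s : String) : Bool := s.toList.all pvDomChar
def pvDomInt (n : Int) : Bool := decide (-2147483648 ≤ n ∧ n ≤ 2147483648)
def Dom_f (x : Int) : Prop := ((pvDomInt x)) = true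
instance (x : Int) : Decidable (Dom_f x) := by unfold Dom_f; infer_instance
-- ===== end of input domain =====

-- B replaces A's fused two-counter while-loop by the octal digit list: count the odd
-- digits once and obtain the even count by subtraction from the length (objective: idiomatic).

-- ===== PORT A =====
-- the while-loop of A, carried as structural recursion on the two accumulators
def fLoop (x a b : Int) : Int × Int :=
  if hx : x > 0 then
    let c := PySem.Int.mod x 2
    if c = 0 then fLoop (PySem.Int.floordiv x 8) (a + 1) b
    else fLoop (PySem.Int.floordiv x 8) a (b + 1)
  else (a, b)
termination_by x.toNat
decreasing_by
  all_goals
    rw [PySem.Int.floordiv_eq_ediv_of_pos (by norm_num : (0:Int) < 8)]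
    omega

-- '%d\n%d' % (a,b) built from PySem.Int.toChars (exact: str of each int, '\n' between)
def f (x : Int) : String :=
  let p := fLoop x 0 0
  String.ofList (PySem.Int.toChars p.1 ++ '\n' :: PySem.Int.toChars p.2)

-- ===== PORT B =====
-- the digit values of oct(n) (exact: oct's digits are '0'..'7', int(d) reads the value back)
def octDigits (n : Nat) : List Nat :=
  if n = 0 then [] else octDigits (n / 8) ++ [n % 8]

def f_alt (x : Int) : String :=
  if x ≤ 0 then String.ofList ['0', '\n', '0']
  else
    let s := octDigits x.toNat
    let b := (s.filter (fun d => d &&& 1 == 1)).length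
    let a := s.length - b
    String.ofList (PySem.Int.toChars (a : Int) ++ '\n' :: PySem.Int.toChars (b : Int))

-- ===== PRECONDITION & SPEC =====
def Spec_f (x : Int) (out : String) : Prop := out = f_alt x
instance (x : Int) (out : String) : Decidable (Spec_f x out) := by unfold Spec_f; infer_instance

-- ===== CLAIM (what is proved, stated in full; the proofs are below) =====
def Claim_equal_f : Prop := ∀ (x : Int), Dom_f x → Spec_f x (f x)

-- ===== LEMMAS AND PROOFS =====

theorem octDigits_pos {n : Nat} (h : n ≠ 0) :
    octDigits n = octDigits (n / 8) ++ [n % 8] := by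
  rw [octDigits]; simp [h]

-- A's loop counts the even / odd octal digits of x.toNat on top of the accumulators
theorem fLoop_eq (x a b : Int) :
    fLoop x a b =
      (a + ((octDigits x.toNat).countP (fun d => d % 2 = 0) : Int),
       b + ((octDigits x.toNat).countP (fun d => d % 2 = 1) : Int)) := by
  induction x, a, b using fLoop.induct with
  | case1 x a b hx c hc ih =>
      have hc' : PySem.Int.mod x 2 = 0 := hc
      rw [fLoop]
      simp only [hx, dite_true, hc', if_true]
      rw [ih]
      rw [PySem.Int.mod_eq_emod_of_pos (by norm_num : (0:Int) < 2)] at hc'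
      have hdiv : (PySem.Int.floordiv x 8).toNat = x.toNat / 8 := by
        rw [PySem.Int.floordiv_eq_ediv_of_pos (by norm_num : (0:Int) < 8)]; omega
      rw [hdiv, octDigits_pos (by omega : x.toNat ≠ 0), List.countP_append]
      have hpar : x.toNat % 8 % 2 = 0 := by omega
      simp [hpar, Prod.ext_iff]
      ring
  | case2 x a b hx c hc ih =>
      have hc' : ¬ PySem.Int.mod x 2 = 0 := hc
      rw [fLoop]
      simp only [hx, dite_true, hc', if_false]
      rw [ih]
      rw [PySem.Int.mod_eq_emod_of_pos (by norm_num : (0:Int) < 2)] at hc'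
      have hdiv : (PySem.Int.floordiv x 8).toNat = x.toNat / 8 := by
        rw [PySem.Int.floordiv_eq_ediv_of_pos (by norm_num : (0:Int) < 8)]; omega
      rw [hdiv, octDigits_pos (by omega : x.toNat ≠ 0), List.countP_append]
      have hpar : x.toNat % 8 % 2 = 1 := by omega
      simp [hpar, Prod.ext_iff]
      ring
  | case3 x a b hx =>
      rw [fLoop]
      have h0 : x.toNat = 0 := by omega
      simp [hx, h0, octDigits]

theorem filter_len_eq_countP (s : List Nat) :
    (s.filter (fun d => d &&& 1 == 1)).length = s.countP (fun d => d % 2 = 1) := by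
  rw [← List.countP_eq_length_filter]
  apply List.countP_congr
  intro d _
  simp [Nat.and_one_is_mod]

theorem countP_even_eq_sub (s : List Nat) :
    s.countP (fun d => d % 2 = 0) = s.length - s.countP (fun d => d % 2 = 1) := by
  have h := List.length_eq_countP_add_countP (l := s) (p := fun d => d % 2 = 1)
  have he : s.countP (fun d => ¬ d % 2 = 1) = s.countP (fun d => d % 2 = 0) := by
    apply List.countP_congr
    intro d _
    simp
  simp only [decide_eq_true_eq] at h
  rw [he] at h
  omega

-- ===== VERDICT (by name: the statement is the Claim_ definition above) =====
theorem f_spec : Claim_equal_f := by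
  intro x _
  unfold Spec_f f f_alt
  rw [fLoop_eq]
  by_cases hx : x ≤ 0
  · have h0 : x.toNat = 0 := by omega
    simp [hx, h0, octDigits]
    decide
  · simp only [hx, if_false]
    rw [filter_len_eq_countP, ← countP_even_eq_sub]
    simp
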